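-- pv_equiv track=rewrite | github.com/yyu233/Python_Practice | hw5/word_processing.py | get_most_common_end
-- ===== SOURCE A (Python) =====
-- def get_most_common_end(words):
--     '''
--         What is the most common ending letter
--         words: list of strings
--         return: char
--     '''
--     lut = {}
--     res = ""
--     maxcnt = 0
--
--     assert isinstance(words, list)
--     for w in words:
--         assert isinstance(w, str)
--         lastchar = w[-1]
--         if lastchar in lut:
--             lut[lastchar] = lut[lastchar] + 1
--         else:
--             lut[lastchar] = 1
--         if lut[lastchar] > maxcnt:
--             res = lastchar
--             maxcnt = lut[lastchar]
--
--     return res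
-- ===== SOURCE B (Python) =====
-- def get_most_common_end(words):
--     '''Count-table then rescan: build full counts of last letters, take the
--     maximum M, then rescan the words and return the first last-letter whose
--     running count reaches M (A's tie-break), or "" for no words.'''
--     assert isinstance(words, list)
--     counts = {}
--     for w in words:
--         assert isinstance(w, str)
--         c = w[-1]
--         counts[c] = counts.get(c, 0) + 1
--     if not words:
--         return ""
--     m = max(counts.values())
--     running = {}
--     for w in words:
--         c = w[-1]
--         running[c] = running.get(c, 0) + 1
--         if running[c] == m:
--             return c
-- ===== Notes on version B (the rewrite author's own statement) =====
-- stated objective: alternative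
-- what changed: A keeps a running maximum inside a single counting pass; B first builds the full count table of last letters, takes its maximum M, and then rescans the words returning the first last-letter whose running count reaches M (same value and tie-break).
import Mathlib
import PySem

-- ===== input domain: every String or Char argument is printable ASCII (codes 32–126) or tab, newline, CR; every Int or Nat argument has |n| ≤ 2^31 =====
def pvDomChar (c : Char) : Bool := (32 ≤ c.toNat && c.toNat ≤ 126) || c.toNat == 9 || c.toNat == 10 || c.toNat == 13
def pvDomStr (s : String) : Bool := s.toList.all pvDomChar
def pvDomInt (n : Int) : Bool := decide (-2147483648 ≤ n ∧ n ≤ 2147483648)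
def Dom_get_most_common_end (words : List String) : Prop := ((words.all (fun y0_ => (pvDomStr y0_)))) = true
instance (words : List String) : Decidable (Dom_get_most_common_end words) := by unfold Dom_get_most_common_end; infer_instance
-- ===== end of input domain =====

-- B replaces A's single incremental-max pass by a count-table-then-rescan decomposition (same results, same tie-break); objective: alternative structure, not speed.

-- ===== PORT A =====
-- loop body of A for one word whose last character is `lastchar` (the dict update and the running-max update)
def pvStepA (s : PySem.Dict Char Int × String × Int) (lastchar : Char) :
    PySem.Dict Char Int × String × Int :=
  let lut := if s.1.contains lastchar then s.1.insert lastchar (s.1.getD lastchar 0 + 1)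
             else s.1.insert lastchar 1
  if lut.getD lastchar 0 > s.2.2 then (lut, String.mk [lastchar], lut.getD lastchar 0)
  else (lut, s.2.1, s.2.2)

def get_most_common_end (words : List String) : String :=
  (words.foldl (fun s w =>
      match PySem.Str.pyGet? w (-1) with   -- w[-1]; none = IndexError, excluded by Pre_
      | none => s
      | some lastchar => pvStepA s lastchar)
    (PySem.Dict.empty, "", 0)).2.1

-- ===== PORT B =====
-- second pass of B: running counts, return the first last-letter whose count reaches m
def pvRescanB : List String → PySem.Dict Char Int → Int → String
  | [], _, _ => ""                         -- unreachable when m = max of the full counts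
  | w :: ws, running, m =>
      match PySem.Str.pyGet? w (-1) with   -- w[-1]; none = IndexError, excluded by Pre_
      | none => pvRescanB ws running m
      | some c =>
        let running' := running.insert c (running.getD c 0 + 1)
        if running'.getD c 0 = m then String.mk [c] else pvRescanB ws running' m

def get_most_common_end_alt (words : List String) : String :=
  let counts := words.foldl (fun d w =>
      match PySem.Str.pyGet? w (-1) with   -- w[-1]; none = IndexError, excluded by Pre_
      | none => d
      | some c => d.insert c (d.getD c 0 + 1)) PySem.Dict.empty
  if words = [] then ""
  else
    match PySem.List.max? counts.values (fun v => v) with  -- max(counts.values())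
    | none => ""                           -- unreachable under Pre_ for nonempty words
    | some m => pvRescanB words PySem.Dict.empty m

-- ===== PRECONDITION & SPEC =====
-- Pre_ excludes exactly the inputs on which Python A raises: a list containing the
-- empty string, where w[-1] is an IndexError.
def Pre_get_most_common_end (words : List String) : Prop := ∀ w ∈ words, w ≠ ""
instance (words : List String) : Decidable (Pre_get_most_common_end words) := by
  unfold Pre_get_most_common_end; infer_instance

def pvWitness_get_most_common_end : List String := ["ab", "cb", "d"]

def Spec_get_most_common_end (words : List String) (out : String) : Prop := out = get_most_common_end_alt words
instance (words : List String) (out : String) : Decidable (Spec_get_most_common_end words out) := by unfold Spec_get_most_common_end; infer_instance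

-- ===== CLAIM (what is proved, stated in full; the proofs are below) =====
def Claim_equal_get_most_common_end : Prop := ∀ (words : List String), Dom_get_most_common_end words → Pre_get_most_common_end words → Spec_get_most_common_end words (get_most_common_end words)

-- ===== LEMMAS AND PROOFS =====

-- the sequence of last characters (skipping words with no last character, as both ports do)
def pvLastChars (words : List String) : List Char :=
  words.filterMap (fun w => PySem.Str.pyGet? w (-1))

-- char-level count table (B's first pass, over last characters)
def pvCnts (L : List Char) : PySem.Dict Char Int :=
  L.foldl (fun d x => d.insert x (d.getD x 0 + 1)) PySem.Dict.empty

-- char-level A fold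
def pvAfold (L : List Char) : PySem.Dict Char Int × String × Int :=
  L.foldl pvStepA (PySem.Dict.empty, "", 0)

-- char-level rescan, Option-valued
def pvScanO : List Char → PySem.Dict Char Int → Int → Option Char
  | [], _, _ => none
  | c :: t, d, m =>
      let d' := d.insert c (d.getD c 0 + 1)
      if d'.getD c 0 = m then some c else pvScanO t d' m

theorem pvBridgeA (words : List String) (s : PySem.Dict Char Int × String × Int) :
    words.foldl (fun s w =>
      match PySem.Str.pyGet? w (-1) with
      | none => s
      | some lastchar => pvStepA s lastchar) s
    = (pvLastChars words).foldl pvStepA s := by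
  induction words generalizing s with
  | nil => rfl
  | cons w ws ih =>
      have ih' := fun s => ih s
      simp only [pvLastChars] at ih'
      simp only [List.foldl_cons, pvLastChars, List.filterMap_cons]
      cases h : PySem.Str.pyGet? w (-1) with
      | none => simp only [h]; exact ih' s
      | some c => simp only [h, List.foldl_cons]; exact ih' _

theorem pvBridgeCnts (words : List String) (d : PySem.Dict Char Int) :
    words.foldl (fun d w =>
      match PySem.Str.pyGet? w (-1) with
      | none => d
      | some c => d.insert c (d.getD c 0 + 1)) d
    = (pvLastChars words).foldl (fun d x => d.insert x (d.getD x 0 + 1)) d := by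
  induction words generalizing d with
  | nil => rfl
  | cons w ws ih =>
      have ih' := fun d => ih d
      simp only [pvLastChars] at ih'
      simp only [List.foldl_cons, pvLastChars, List.filterMap_cons]
      cases h : PySem.Str.pyGet? w (-1) with
      | none => simp only [h]; exact ih' d
      | some c => simp only [h, List.foldl_cons]; exact ih' _

theorem pvBridgeScan (words : List String) (d : PySem.Dict Char Int) (m : Int) :
    pvRescanB words d m
    = (match pvScanO (pvLastChars words) d m with
       | some c => String.mk [c]
       | none => "") := by
  induction words generalizing d with
  | nil => rfl
  | cons w ws ih =>
      have ih' := fun d => ih d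
      simp only [pvLastChars] at ih'
      simp only [pvRescanB, pvLastChars, List.filterMap_cons]
      cases h : PySem.Str.pyGet? w (-1) with
      | none => simp only [h]; exact ih' d
      | some c =>
          simp only [h, pvScanO]
          split_ifs with hif
          · rfl
          · exact ih' _

theorem pvGetD_cnts (L : List Char) (c : Char) :
    (pvCnts L).getD c 0 = (L.count c : Int) := by
  have h0 : (PySem.Dict.empty (κ := Char) (ν := Int)).getD c 0 = 0 := rfl
  rw [pvCnts, PySem.Dict.getD_foldl_insert_add_one, h0, zero_add]

theorem pvCnts_append (L : List Char) (c : Char) :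
    pvCnts (L ++ [c]) = (pvCnts L).insert c ((pvCnts L).getD c 0 + 1) := by
  simp [pvCnts, List.foldl_append]

theorem pvCnts_eq_counter (L : List Char) : pvCnts L = PySem.Dict.counter L :=
  PySem.Dict.foldl_insert_getD_add_one_eq_counter L

-- scan misses when the target exceeds every attainable running count
theorem pvScanO_none (L : List Char) (d : PySem.Dict Char Int) (m : Int)
    (h : ∀ c, d.getD c 0 + (L.count c : Int) < m) : pvScanO L d m = none := by
  induction L generalizing d with
  | nil => rfl
  | cons c t ih =>
      simp only [pvScanO]
      have hc := h c
      have h1 : (d.insert c (d.getD c 0 + 1)).getD c 0 = d.getD c 0 + 1 :=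
        PySem.Dict.getD_insert_self d c _ 0
      rw [if_neg]
      · apply ih
        intro e
        have he := h e
        rw [PySem.Dict.getD_insert d c e _ 0]
        by_cases hec : e = c <;>
          simp [hec, List.count_cons] at he ⊢ <;> omega
      · have : (t.count c : Int) ≥ 0 := by positivity
        simp [h1] at hc ⊢
        omega

theorem pvScanO_append (L1 L2 : List Char) (d : PySem.Dict Char Int) (m : Int) :
    pvScanO (L1 ++ L2) d m
    = (match pvScanO L1 d m with
       | some x => some x
       | none => pvScanO L2 (L1.foldl (fun d x => d.insert x (d.getD x 0 + 1)) d) m) := by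
  induction L1 generalizing d with
  | nil => rfl
  | cons c t ih =>
      simp only [List.cons_append, pvScanO]
      split_ifs with h <;> simp [h, ih]

-- the bundled invariant for A's single pass, by snoc induction
theorem pvMain (L : List Char) :
    (pvAfold L).1 = pvCnts L ∧
    (∀ c, (L.count c : Int) ≤ (pvAfold L).2.2) ∧
    (L = [] → (pvAfold L).2.1 = "" ∧ (pvAfold L).2.2 = 0) ∧
    (L ≠ [] → ∃ x, pvScanO L PySem.Dict.empty (pvAfold L).2.2 = some x ∧
        (pvAfold L).2.1 = String.mk [x] ∧
        ∃ e ∈ L, (L.count e : Int) = (pvAfold L).2.2) := by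
  induction L using List.reverseRecOn with
  | nil =>
      refine ⟨rfl, ?_, fun _ => ⟨rfl, rfl⟩, fun h => absurd rfl h⟩
      intro c; simp [pvAfold]
  | append_singleton L c ih =>
      obtain ⟨hdict, hub, hnil, hne⟩ := ih
      have hfold : pvAfold (L ++ [c]) = pvStepA (pvAfold L) c := by
        simp [pvAfold, List.foldl_append]
      set M := (pvAfold L).2.2 with hM
      have hgd : (pvAfold L).1.getD c 0 = (L.count c : Int) := by rw [hdict]; exact pvGetD_cnts L c
      -- A's dict update equals the unconditional insert form
      have hlut : (if (pvAfold L).1.contains c then (pvAfold L).1.insert c ((pvAfold L).1.getD c 0 + 1)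
                   else (pvAfold L).1.insert c 1) = pvCnts (L ++ [c]) := by
        rw [pvCnts_append, ← hdict]
        by_cases hc : (pvAfold L).1.contains c = true
        · simp [hc]
        · have hnotin : c ∉ L := by
            have := PySem.Dict.contains_counter L c
            rw [hdict, pvCnts_eq_counter] at hc
            simp [this] at hc
            simpa using hc
          have : (L.count c : Int) = 0 := by simp [List.count_eq_zero_of_not_mem hnotin]
          simp [hc, hgd, this]
      have hnewcnt : (pvCnts (L ++ [c])).getD c 0 = (L.count c : Int) + 1 := by
        rw [pvCnts_append, PySem.Dict.getD_insert_self, pvGetD_cnts]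
      have hcntapp : ∀ e, ((L ++ [c]).count e : Int)
          = (L.count e : Int) + (if e = c then 1 else 0) := by
        intro e
        by_cases hec : e = c
        · subst hec; simp [List.count_append]
        · have hce : ¬c = e := fun h => hec h.symm
          simp [hec, hce, List.count_append]
      have hstep : pvAfold (L ++ [c]) =
          (if (pvCnts (L ++ [c])).getD c 0 > M
           then (pvCnts (L ++ [c]), String.mk [c], (pvCnts (L ++ [c])).getD c 0)
           else (pvCnts (L ++ [c]), (pvAfold L).2.1, M)) := by
        rw [hfold]; unfold pvStepA
        rw [hlut]
      by_cases hup : (pvCnts (L ++ [c])).getD c 0 > M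
      · -- running count of c exceeds the old max: res and maxcnt update
        rw [hstep, if_pos hup]
        have hcnew : (pvCnts (L ++ [c])).getD c 0 = M + 1 := by
          have := hub c; rw [hnewcnt] at hup ⊢; omega
        refine ⟨rfl, ?_, by simp, ?_⟩
        · intro e
          have := hub e
          rw [hcntapp e]
          by_cases hec : e = c
          · subst hec; rw [hnewcnt] at hcnew; simp; omega
          · have hce : ¬c = e := fun h => hec h.symm
            simp [hec, hce]; omega
        · intro _
          refine ⟨c, ?_, rfl, c, by simp, ?_⟩
          · rw [pvScanO_append]
            have hmiss : pvScanO L PySem.Dict.empty ((pvCnts (L ++ [c])).getD c 0) = none := by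
              apply pvScanO_none
              intro e
              have := hub e
              have hemp : (PySem.Dict.empty (κ := Char) (ν := Int)).getD e 0 = 0 := rfl
              rw [hemp, hcnew]; omega
            rw [hmiss]
            simp only [pvScanO]
            have hfd : (L.foldl (fun d x => d.insert x (d.getD x 0 + 1)) PySem.Dict.empty) = pvCnts L := rfl
            rw [hfd]
            have h2 : ((pvCnts L).insert c ((pvCnts L).getD c 0 + 1)).getD c 0
                = (pvCnts (L ++ [c])).getD c 0 := by rw [pvCnts_append]
            simp only [h2]
            simp
          · rw [hcntapp c]; simp [hnewcnt]
      · -- no update: res and maxcnt stay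
        rw [hstep, if_neg hup]
        have hle : (L.count c : Int) + 1 ≤ M := by rw [hnewcnt] at hup; omega
        have hLne : L ≠ [] := by
          intro h; subst h
          have := (hnil rfl).2
          simp [List.count_nil] at hle
          omega
        obtain ⟨x, hxscan, hxres, e, heL, hecount⟩ := hne hLne
        refine ⟨rfl, ?_, by simp, ?_⟩
        · intro f
          have := hub f
          rw [hcntapp f]
          by_cases hfc : f = c
          · subst hfc; simp; omega
          · simp [hfc]; omega
        · intro _
          have hec : e ≠ c := by
            intro h; subst h; omega
          refine ⟨x, ?_, hxres, e, by simp [heL], ?_⟩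
          · rw [pvScanO_append, hxscan]
          · rw [hcntapp e]; simp [hec, hecount]

-- values of the count table = counts of the distinct last characters
theorem pvMaxEq (L : List Char) (hL : L ≠ [])
    (hub : ∀ c, (L.count c : Int) ≤ (pvAfold L).2.2)
    (hmem : ∃ e ∈ L, (L.count e : Int) = (pvAfold L).2.2) :
    PySem.List.max? (pvCnts L).values (fun v => v) = some ((pvAfold L).2.2) := by
  have hvals : (pvCnts L).values = (PySem.Set.ofList L).map (fun k => (L.count k : Int)) := by
    rw [pvCnts_eq_counter]
    have := PySem.Dict.items_counter L
    simp only [PySem.Dict.values, this, List.map_map]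
    rfl
  obtain ⟨e, heL, hecount⟩ := hmem
  have heset : e ∈ PySem.Set.ofList L := (PySem.Set.mem_ofList L e).mpr heL
  have hvne : (pvCnts L).values ≠ [] := by
    rw [hvals]
    intro h
    rw [List.map_eq_nil_iff] at h
    rw [h] at heset; simp at heset
  cases hmax : PySem.List.max? (pvCnts L).values (fun v => v) with
  | none => exact absurd ((PySem.List.max?_eq_none_iff _ _).mp hmax) hvne
  | some m =>
      congr 1
      have hm_mem : m ∈ (pvCnts L).values := PySem.List.max?_mem hmax
      have hm_le : m ≤ (pvAfold L).2.2 := by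
        rw [hvals] at hm_mem
        obtain ⟨k, hk, hkm⟩ := List.mem_map.mp hm_mem
        have : k ∈ L := (PySem.Set.mem_ofList L k).mp hk
        rw [← hkm]; exact hub k
      have h_le_m : (pvAfold L).2.2 ≤ m := by
        have : (pvAfold L).2.2 ∈ (pvCnts L).values := by
          rw [hvals]
          exact List.mem_map.mpr ⟨e, heset, hecount⟩
        exact PySem.List.max?_isMax hmax _ this
      omega

-- ===== VERDICT (by name: the statement is the Claim_ definition above) =====
theorem get_most_common_end_spec : Claim_equal_get_most_common_end := by
  intro words _ _
  unfold Spec_get_most_common_end get_most_common_end get_most_common_end_alt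
  rw [pvBridgeA, pvBridgeCnts]
  obtain ⟨hdict, hub, hnil, hne⟩ := pvMain (pvLastChars words)
  by_cases hw : words = []
  · subst hw
    simp [pvLastChars, pvAfold] at *
  · rw [if_neg hw]
    by_cases hL : pvLastChars words = []
    · rw [show (pvLastChars words).foldl pvStepA (PySem.Dict.empty, "", 0) = pvAfold (pvLastChars words) from rfl]
      rw [show ((pvLastChars words).foldl (fun d x => d.insert x (d.getD x 0 + 1)) PySem.Dict.empty) = pvCnts (pvLastChars words) from rfl]
      rw [hL]
      simp [pvCnts, pvAfold, PySem.Dict.values, PySem.Dict.empty]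
      rfl
    · obtain ⟨x, hxscan, hxres, hwit⟩ := hne hL
      rw [show (pvLastChars words).foldl pvStepA (PySem.Dict.empty, "", 0) = pvAfold (pvLastChars words) from rfl]
      rw [show ((pvLastChars words).foldl (fun d x => d.insert x (d.getD x 0 + 1)) PySem.Dict.empty) = pvCnts (pvLastChars words) from rfl]
      rw [pvMaxEq (pvLastChars words) hL hub hwit]
      show (pvAfold (pvLastChars words)).2.1
          = pvRescanB words PySem.Dict.empty ((pvAfold (pvLastChars words)).2.2)
      rw [pvBridgeScan, hxscan, hxres]
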